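-- pv_equiv track=rewrite | github.com/arielibaba/cognidoc | src/cognidoc/utils/advanced_rag.py | reorder_lost_in_middle
-- ===== SOURCE A (Python) =====
-- from typing import List, Dict, Any, Optional, Tuple
--
-- def reorder_lost_in_middle(documents: List[Any]) -> List[Any]:
--     """
--     Reorder documents to mitigate the "lost in the middle" problem.
--
--     LLMs tend to pay more attention to the beginning and end of context.
--     This reordering places the most relevant documents at the start and end,
--     with less relevant ones in the middle.
--
--     Args:
--         documents: List of documents (assumed ordered by relevance, best first)
--
--     Returns:
--         Reordered list with best docs at start and end
--     """
--     if len(documents) <= 2: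
--         return documents
--
--     # Split into two halves
--     reordered = []
--     left = []
--     right = []
--
--     for i, doc in enumerate(documents):
--         if i % 2 == 0:
--             left.append(doc)
--         else:
--             right.append(doc)
--
--     # Interleave: best at start, second-best at end, etc.
--     # Pattern: 0, 2, 4, ... (middle) ..., 5, 3, 1
--     reordered = left + list(reversed(right))
--
--     return reordered
-- ===== SOURCE B (Python) =====
-- def reorder_lost_in_middle(documents):
--     if len(documents) <= 2:
--         return documents
--     n = len(documents)
--     half = (n + 1) // 2
--     # closed-form permutation: output position j takes input index 2j (first half)
--     # or 2(n-1-j)+1 (second half)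
--     return [documents[2 * j if j < half else 2 * (n - 1 - j) + 1] for j in range(n)]
-- ===== Notes on version B (the rewrite author's own statement) =====
-- stated objective: alternative
-- what changed: Replaces A's partition-into-evens/odds pass followed by reversal and concatenation with a closed-form index permutation: one comprehension over output positions j directly fetches documents[2j] for the first half and documents[2(n-1-j)+1] for the second half, building no intermediate lists and doing no reversal.
import Mathlib
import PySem

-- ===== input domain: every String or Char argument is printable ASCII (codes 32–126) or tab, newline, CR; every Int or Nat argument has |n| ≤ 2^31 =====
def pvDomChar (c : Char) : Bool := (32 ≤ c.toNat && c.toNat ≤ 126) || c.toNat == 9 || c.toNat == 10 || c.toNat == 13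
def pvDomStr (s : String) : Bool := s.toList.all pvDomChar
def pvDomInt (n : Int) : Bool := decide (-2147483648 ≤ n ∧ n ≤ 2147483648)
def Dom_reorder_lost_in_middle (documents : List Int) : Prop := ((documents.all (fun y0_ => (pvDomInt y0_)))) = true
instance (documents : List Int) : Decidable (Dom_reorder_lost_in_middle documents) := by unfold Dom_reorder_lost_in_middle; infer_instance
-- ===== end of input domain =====

-- B replaces A's evens/odds partition + reversal + concatenation with a closed-form
-- index permutation computed position-by-position (alternative algorithm, same O(n) cost).

-- ===== PORT A =====
-- the 'for i, doc in enumerate(documents)' loop of A, state = (left, right)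
def pvLoopA : List Int → Nat → List Int → List Int → (List Int × List Int)
  | [], _, l, r => (l, r)
  | d :: ds, i, l, r =>
    if i % 2 = 0 then pvLoopA ds (i + 1) (l ++ [d]) r
    else pvLoopA ds (i + 1) l (r ++ [d])

def reorder_lost_in_middle (documents : List Int) : List Int :=
  if documents.length ≤ 2 then documents
  else
    let lr := pvLoopA documents 0 [] []
    lr.1 ++ lr.2.reverse

-- ===== PORT B =====
-- documents[idx]: idx is a non-negative, provably in-range index (2j ≤ n-1 when j < half,
-- 2(n-1-j)+1 ≤ n-1 when half ≤ j < n), so List.getD is exact for Python's documents[idx] here.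
def reorder_lost_in_middle_alt (documents : List Int) : List Int :=
  if documents.length ≤ 2 then documents
  else
    let n := documents.length
    let half := (n + 1) / 2
    (List.range n).map (fun j =>
      documents.getD (if j < half then 2 * j else 2 * (n - 1 - j) + 1) 0)

-- ===== PRECONDITION & SPEC =====
def Spec_reorder_lost_in_middle (documents : List Int) (out : List Int) : Prop := out = reorder_lost_in_middle_alt documents
instance (documents : List Int) (out : List Int) : Decidable (Spec_reorder_lost_in_middle documents out) := by unfold Spec_reorder_lost_in_middle; infer_instance

-- ===== CLAIM (what is proved, stated in full; the proofs are below) =====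
def Claim_equal_reorder_lost_in_middle : Prop := ∀ (documents : List Int), Dom_reorder_lost_in_middle documents → Spec_reorder_lost_in_middle documents (reorder_lost_in_middle documents)

-- ===== LEMMAS AND PROOFS =====

/-- elements at even (`true`) / odd (`false`) positions of the list. -/
def pvPick : Bool → List Int → List Int
  | _, [] => []
  | true, d :: ds => d :: pvPick false ds
  | false, _ :: ds => pvPick true ds

theorem pvLoopA_eq : ∀ (ds : List Int) (i : Nat) (l r : List Int),
    pvLoopA ds i l r =
      (l ++ (if i % 2 = 0 then pvPick true ds else pvPick false ds),
       r ++ (if i % 2 = 0 then pvPick false ds else pvPick true ds)) := by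
  intro ds
  induction ds with
  | nil => intro i l r; by_cases h : i % 2 = 0 <;> simp [pvLoopA, pvPick, h]
  | cons d ds ih =>
    intro i l r
    by_cases h : i % 2 = 0
    · have h2 : ¬ (i + 1) % 2 = 0 := by omega
      simp [pvLoopA, h, ih, h2, pvPick]
    · have h2 : (i + 1) % 2 = 0 := by omega
      simp [pvLoopA, h, ih, h2, pvPick]

theorem pvPick_length : ∀ (l : List Int),
    (pvPick true l).length = (l.length + 1) / 2 ∧ (pvPick false l).length = l.length / 2 := by
  intro l
  induction l with
  | nil => simp [pvPick]
  | cons d ds ih => simp only [pvPick, List.length_cons]; omega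

theorem pvPick_get? : ∀ (l : List Int) (j : Nat),
    (pvPick true l)[j]? = l[2 * j]? ∧ (pvPick false l)[j]? = l[2 * j + 1]? := by
  intro l
  induction l with
  | nil => simp [pvPick]
  | cons d ds ih =>
    intro j
    refine ⟨?_, ?_⟩
    · cases j with
      | zero => simp [pvPick]
      | succ j =>
        have h1 : 2 * (j + 1) = 2 * j + 1 + 1 := by omega
        simp only [pvPick, h1, List.getElem?_cons_succ]
        exact (ih j).2
    · simp only [pvPick, List.getElem?_cons_succ]
      exact (ih j).1

theorem reorder_lost_in_middle_spec : Claim_equal_reorder_lost_in_middle := by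
  intro documents _
  unfold Spec_reorder_lost_in_middle reorder_lost_in_middle reorder_lost_in_middle_alt
  by_cases h : documents.length ≤ 2
  · simp [h]
  · simp only [if_neg h]
    rw [pvLoopA_eq]
    simp only [Nat.zero_mod, reduceIte, List.nil_append]
    set n := documents.length with hn
    set half := (n + 1) / 2 with hhalf
    have hE : (pvPick true documents).length = half := (pvPick_length documents).1
    have hO : (pvPick false documents).length = n / 2 := (pvPick_length documents).2
    apply List.ext_getElem?
    intro j
    by_cases hjn : j < n
    · -- RHS: map over range
      rw [List.getElem?_map, List.getElem?_range hjn]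
      simp only [Option.map_some]
      by_cases hjh : j < half
      · rw [List.getElem?_append_left (by omega), (pvPick_get? documents j).1]
        have hlt : 2 * j < n := by omega
        rw [List.getElem?_eq_getElem hlt]
        simp [List.getD, hjh, List.getElem?_eq_getElem hlt]
      · rw [List.getElem?_append_right (by omega), hE]
        have hjO : j - half < (pvPick false documents).reverse.length := by
          simp only [List.length_reverse]; omega
        rw [List.getElem?_reverse (by simpa [List.length_reverse] using hjO)]
        rw [hO]
        have hidx : n / 2 - 1 - (j - half) = n - 1 - j := by omega
        rw [hidx, (pvPick_get? documents (n - 1 - j)).2]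
        have hlt : 2 * (n - 1 - j) + 1 < n := by omega
        rw [List.getElem?_eq_getElem hlt]
        simp [List.getD, hjh, List.getElem?_eq_getElem hlt]
    · rw [List.getElem?_eq_none, List.getElem?_eq_none]
      · simp only [List.length_map, List.length_range]; omega
      · simp only [List.length_append, List.length_reverse, hE, hO]; omega
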